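-- pv_equiv track=rewrite | github.com/spraakbanken/paradigmextract | paradigmextract/pextract.py | _ffilter_leftmost_sum
-- ===== SOURCE A (Python) =====
-- def _ffilter_leftmost_sum(factorlist):  # noqa: ANN202, ANN001
--     return [
--         [
--             x
--             for x in w
--             if sum(i for i in range(len(x)) if x.startswith("[", i))
--             == min(sum(i for i in range(len(x)) if x.startswith("[", i)) for x in w)
--         ]
--         for w in factorlist
--     ]
-- ===== SOURCE B (Python) =====
-- def _ffilter_leftmost_sum(factorlist):
--     result = []
--     for w in factorlist:
--         best = None
--         chosen = []
--         for x in w: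
--             s = sum(i for i, c in enumerate(x) if c == "[")
--             if best is None or s < best:
--                 best = s
--                 chosen = [x]
--             elif s == best:
--                 chosen.append(x)
--         result.append(chosen)
--     return result
-- ===== Notes on version B (the rewrite author's own statement) =====
-- stated objective: faster
-- what changed: B replaces the per-element recomputation of the group minimum (and of each score) by a single fused pass per group that maintains a running minimum and the list of strings attaining it.
import Mathlib
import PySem

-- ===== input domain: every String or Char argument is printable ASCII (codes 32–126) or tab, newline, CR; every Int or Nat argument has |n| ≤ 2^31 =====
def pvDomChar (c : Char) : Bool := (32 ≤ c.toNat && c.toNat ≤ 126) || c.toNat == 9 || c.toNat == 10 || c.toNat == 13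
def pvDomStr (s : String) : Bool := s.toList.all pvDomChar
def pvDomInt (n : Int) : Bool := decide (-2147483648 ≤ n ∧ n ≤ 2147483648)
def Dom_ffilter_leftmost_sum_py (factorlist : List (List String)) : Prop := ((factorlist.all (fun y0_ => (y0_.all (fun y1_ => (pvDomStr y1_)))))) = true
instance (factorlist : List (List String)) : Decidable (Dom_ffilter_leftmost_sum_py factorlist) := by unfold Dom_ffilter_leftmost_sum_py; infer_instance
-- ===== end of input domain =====

-- B fuses the per-group min computation and the filter into one pass with a running minimum,
-- computing each string's score once instead of recomputing the group minimum for every element (objective: faster).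

-- ===== PORT A =====
-- x.startswith("[", i) with 0 ≤ i: Python checks whether "[" is a prefix of x at offset i;
-- exact for the nonnegative offsets produced by range(len(x)).
def pvStartswithAt (x : String) (p : String) (i : Int) : Bool :=
  PySem.Chars.startswith (x.toList.drop i.toNat) p.toList

-- sum(i for i in range(len(x)) if x.startswith("[", i))
def pvScoreA (x : String) : Int :=
  (PySem.List.pyRange 0 (x.toList.length : Int) 1).foldl
    (fun acc i => if pvStartswithAt x "[" i then acc + i else acc) 0

def ffilter_leftmost_sum_py (factorlist : List (List String)) : List (List String) :=
  factorlist.map (fun w =>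
    w.filter (fun x =>
      decide (some (pvScoreA x) = PySem.List.min? (w.map (fun x => pvScoreA x)) (fun y => y))))

-- ===== PORT B =====
-- sum(i for i, c in enumerate(x) if c == "[")
def pvScoreB (x : String) : Int :=
  (PySem.List.enumerate x.toList 0).foldl
    (fun acc p => if p.2 = '[' then acc + p.1 else acc) 0

-- the inner loop of B: running minimum `best` and the collected list `chosen`
def pvGoB : List String → Option Int → List String → List String
  | [], _, chosen => chosen
  | x :: t, best, chosen =>
    let s := pvScoreB x
    match best with
    | none => pvGoB t (some s) [x]
    | some b =>
      if s < b then pvGoB t (some s) [x]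
      else if s = b then pvGoB t (some b) (chosen ++ [x])
      else pvGoB t (some b) chosen

def ffilter_leftmost_sum_py_alt (factorlist : List (List String)) : List (List String) :=
  (factorlist.foldl (fun result w => result ++ [pvGoB w none []]) [])

-- ===== PRECONDITION & SPEC =====
def Spec_ffilter_leftmost_sum_py (factorlist : List (List String)) (out : List (List String)) : Prop := out = ffilter_leftmost_sum_py_alt factorlist
instance (factorlist : List (List String)) (out : List (List String)) : Decidable (Spec_ffilter_leftmost_sum_py factorlist out) := by unfold Spec_ffilter_leftmost_sum_py; infer_instance

-- ===== CLAIM (what is proved, stated in full; the proofs are below) =====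
def Claim_equal_ffilter_leftmost_sum_py : Prop := ∀ (factorlist : List (List String)), Dom_ffilter_leftmost_sum_py factorlist → Spec_ffilter_leftmost_sum_py factorlist (ffilter_leftmost_sum_py factorlist)

-- ===== LEMMAS AND PROOFS =====

theorem startswith_singleton (c : Char) (l : List Char) :
    PySem.Chars.startswith l [c] = true ↔ l.head? = some c := by
  rw [PySem.Chars.startswith_iff]
  constructor
  · rintro ⟨t, rfl⟩; simp
  · intro h
    cases l with
    | nil => simp at h
    | cons a t => simp at h; subst h; exact ⟨t, rfl⟩

theorem pvScore_eq (x : String) : pvScoreA x = pvScoreB x := by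
  unfold pvScoreA pvScoreB
  rw [PySem.List.enumerate_eq_map_pyRange x.toList ' ', List.foldl_map]
  simp only [PySem.List.len_eq]
  apply PySem.List.foldl_congr_mem
  intro acc i hi
  obtain ⟨h0, h1⟩ := PySem.List.mem_pyRange_one.mp hi
  have hlt : i.toNat < x.toList.length := by omega
  have hc : pvStartswithAt x "[" i = true ↔ PySem.List.pyGetD x.toList i ' ' = '[' := by
    unfold pvStartswithAt
    rw [show "[".toList = ['['] from rfl]
    rw [startswith_singleton, List.head?_drop, PySem.List.pyGetD_of_nonneg _ _ h0,
      List.getElem?_eq_getElem hlt]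
    simp [List.getElem?_eq_getElem hlt]
  by_cases hb : PySem.List.pyGetD x.toList i ' ' = '['
  · rw [if_pos (hc.mpr hb)]; simp [hb]
  · rw [if_neg (fun h => hb (hc.mp h))]; simp [hb]

theorem foldl_min_le_init (l : List Int) (a : Int) : l.foldl min a ≤ a := by
  induction l generalizing a with
  | nil => simp
  | cons y t ih => exact le_trans (ih (min a y)) (min_le_left _ _)

theorem pvGoB_some (t : List String) (b : Int) (cs : List String) :
    pvGoB t (some b) cs =
      (if (t.map pvScoreB).foldl min b = b then cs else []) ++
        t.filter (fun x => decide (pvScoreB x = (t.map pvScoreB).foldl min b)) := by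
  induction t generalizing b cs with
  | nil => simp [pvGoB]
  | cons x r ih =>
    have hle : (r.map pvScoreB).foldl min (min b (pvScoreB x)) ≤ min b (pvScoreB x) :=
      foldl_min_le_init _ _
    simp only [List.map_cons, List.foldl_cons, List.filter_cons]
    show pvGoB (x :: r) (some b) cs = _
    rcases lt_trichotomy (pvScoreB x) b with hlt | heq | hgt
    · have hmin : min b (pvScoreB x) = pvScoreB x := min_eq_right hlt.le
      rw [show pvGoB (x :: r) (some b) cs = pvGoB r (some (pvScoreB x)) [x] by
        simp only [pvGoB]; rw [if_pos hlt]]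
      rw [ih]
      simp only [hmin]
      have hne : (r.map pvScoreB).foldl min (pvScoreB x) ≠ b := by
        rw [hmin] at hle; omega
      rw [if_neg hne]
      by_cases hx : pvScoreB x = (r.map pvScoreB).foldl min (pvScoreB x)
      · rw [if_pos (by omega : (r.map pvScoreB).foldl min (pvScoreB x) = pvScoreB x)]
        rw [if_pos (decide_eq_true hx)]
        simp
      · rw [if_neg (fun h => hx h.symm)]
        simp [hx]
    · have hmin : min b (pvScoreB x) = b := by omega
      rw [show pvGoB (x :: r) (some b) cs = pvGoB r (some b) (cs ++ [x]) by
        simp only [pvGoB]; rw [if_neg (by omega), if_pos heq]]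
      rw [ih]
      simp only [hmin]
      by_cases hm : (r.map pvScoreB).foldl min b = b
      · rw [if_pos hm, if_pos hm]
        have : pvScoreB x = (r.map pvScoreB).foldl min b := by omega
        simp [this]
      · rw [if_neg hm, if_neg hm]
        have : ¬ pvScoreB x = (r.map pvScoreB).foldl min b := by
          rw [hmin] at hle; omega
        simp [this]
    · have hmin : min b (pvScoreB x) = b := min_eq_left hgt.le
      rw [show pvGoB (x :: r) (some b) cs = pvGoB r (some b) cs by
        simp only [pvGoB]; rw [if_neg (by omega), if_neg (by omega)]]
      rw [ih]
      simp only [hmin]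
      have : ¬ pvScoreB x = (r.map pvScoreB).foldl min b := by
        rw [hmin] at hle; omega
      simp [this]

theorem group_eq (w : List String) :
    w.filter (fun x =>
      decide (some (pvScoreA x) = PySem.List.min? (w.map (fun x => pvScoreA x)) (fun y => y)))
      = pvGoB w none [] := by
  cases w with
  | nil => simp [pvGoB]
  | cons x t =>
    simp only [pvScore_eq, List.map_cons]
    rw [PySem.List.min?_id_cons]
    rw [show pvGoB (x :: t) none [] = pvGoB t (some (pvScoreB x)) [x] from rfl]
    rw [pvGoB_some]
    simp only [Option.some.injEq, List.filter_cons]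
    by_cases hm : (t.map pvScoreB).foldl min (pvScoreB x) = pvScoreB x
    · simp [hm]
    · rw [if_neg hm]
      have : ¬ pvScoreB x = (t.map pvScoreB).foldl min (pvScoreB x) := fun h => hm h.symm
      simp [this]

theorem ffilter_leftmost_sum_py_spec : Claim_equal_ffilter_leftmost_sum_py := by
  intro fl _
  unfold Spec_ffilter_leftmost_sum_py ffilter_leftmost_sum_py ffilter_leftmost_sum_py_alt
  rw [PySem.List.foldl_append_eq_flatMap]
  simp only [List.nil_append]
  rw [← List.map_eq_flatMap]
  apply List.map_congr_left
  intro w _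
  exact group_eq w
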